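-- pv_equiv track=rewrite | github.com/olhaarchai/ai-local-reviewer | src/review/utils.py | build_added_content_map
-- ===== SOURCE A (Python) =====
-- def build_added_content_map(diff: str) -> dict[str, str]:
--     """Map `path` → joined added-line content (for lint/grep reasoning)."""
--     content: dict[str, list[str]] = {}
--     current_path: str | None = None
--     for line in diff.splitlines():
--         if line.startswith("+++ b/"):
--             current_path = line[6:]
--             content.setdefault(current_path, [])
--         elif line.startswith("+") and not line.startswith("+++"):
--             if current_path:
--                 content[current_path].append(line[1:])
--     return {p: "\n".join(lines) for p, lines in content.items()}
-- ===== SOURCE B (Python) =====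
-- def build_added_content_map(diff: str) -> dict[str, str]:
--     """Map `path` -> joined added-line content (reverse-scan grouping)."""
--     # Phase 1: scan the lines BACK-TO-FRONT, collecting each header's block of
--     # added lines as it is reached (segments come out in reverse order).
--     pending: list[str] = []
--     segs: list[tuple[str, list[str]]] = []
--     for line in reversed(diff.splitlines()):
--         if line.startswith("+++ b/"):
--             segs.append((line[6:], pending[::-1]))
--             pending = []
--         elif line.startswith("+") and not line.startswith("+++"):
--             pending.append(line[1:])
--     # Phase 2: fold the segments (restored to forward order) into the result,
--     # merging duplicate paths in order.
--     result: dict[str, list[str]] = {}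
--     for path, added in reversed(segs):
--         result.setdefault(path, []).extend(added)
--     return {p: "\n".join(ls) for p, ls in result.items()}
-- ===== Notes on version B (the rewrite author's own statement) =====
-- stated objective: alternative
-- what changed: Replaces A's single forward scan with a current-path state variable by a two-phase decomposition: a reverse scan that groups each '+++ b/' header with its block of added lines into segments, then a fold of the segments (restored to forward order) into the result dict via setdefault+extend.
-- outside the precondition, e.g. on build_added_content_map('+++ b/\n+x'): A returns {'': ''}, B returns {'': 'x'}; on build_added_content_map('+++ b/'): A returns {'': ''}, B returns {'': ''}
import Mathlib
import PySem

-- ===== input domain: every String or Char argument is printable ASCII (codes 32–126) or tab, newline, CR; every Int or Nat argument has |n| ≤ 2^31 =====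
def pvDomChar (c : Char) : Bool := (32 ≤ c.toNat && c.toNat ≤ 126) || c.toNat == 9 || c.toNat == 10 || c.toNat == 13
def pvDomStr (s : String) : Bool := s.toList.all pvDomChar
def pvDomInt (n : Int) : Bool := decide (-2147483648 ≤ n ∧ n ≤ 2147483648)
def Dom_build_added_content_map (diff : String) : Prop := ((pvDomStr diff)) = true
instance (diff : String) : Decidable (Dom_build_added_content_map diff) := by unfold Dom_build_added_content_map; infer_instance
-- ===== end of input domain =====

-- B replaces A's single stateful forward scan by a two-phase decomposition: a reverse scan
-- that groups each header with its block of added lines into segments, then a fold of the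
-- segments into the result dict (objective: alternative decomposition, same cost).

-- ===== PORT A =====
-- transliteration of A's loop body: state = (content dict, current_path)
def pvStepA (st : PySem.Dict String (List String) × Option String) (line : String) :
    PySem.Dict String (List String) × Option String :=
  if PySem.Str.startswith line "+++ b/" then
    let p := PySem.Str.slice line (some 6) none            -- line[6:]
    (st.1.setdefault p [], some p)                         -- content.setdefault(p, [])
  else if PySem.Str.startswith line "+" && !PySem.Str.startswith line "+++" then
    match st.2 with
    | some p =>
        if p = "" then st                                  -- 'if current_path:' (empty string is falsy)
        else (st.1.modify p [] (· ++ [PySem.Str.slice line (some 1) none]), st.2)  -- content[p].append(line[1:])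
    | none => st
  else st

def build_added_content_map (diff : String) : List (String × String) :=
  let r := (PySem.Str.splitlines diff).foldl pvStepA (PySem.Dict.empty, none)
  r.1.items.map (fun pr => (pr.1, PySem.Str.join "\n" pr.2))   -- {p: "\n".join(lines) for p, lines in content.items()}

-- ===== PORT B =====
-- phase-1 step of Source B, run over reversed(lines): state = (pending block lines (reversed), segments so far)
def pvStepB (st : List String × List (String × List String)) (line : String) :
    List String × List (String × List String) :=
  if PySem.Str.startswith line "+++ b/" then
    ([], st.2 ++ [(PySem.Str.slice line (some 6) none, st.1.reverse)])  -- segs.append((line[6:], pending[::-1])); pending = []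
  else if PySem.Str.startswith line "+" && !PySem.Str.startswith line "+++" then
    (st.1 ++ [PySem.Str.slice line (some 1) none], st.2)                -- pending.append(line[1:])
  else st

def build_added_content_map_alt (diff : String) : List (String × String) :=
  let phase1 := (PySem.Str.splitlines diff).reverse.foldl pvStepB ([], [])
  -- phase 2: result.setdefault(path, []).extend(added)  =  d.modify path [] (· ++ added)
  let result := phase1.2.reverse.foldl
    (fun d (s : String × List String) => d.modify s.1 [] (· ++ s.2)) PySem.Dict.empty
  result.items.map (fun pr => (pr.1, PySem.Str.join "\n" pr.2))

-- ===== PRECONDITION & SPEC =====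
-- Pre_ excludes diffs containing the bare header line "+++ b/" (empty path): on that
-- defensible corner A's truthiness check silently drops the block's added lines (the key
-- still appears with empty content) while B keeps them, and neither reading is specified.
def Pre_build_added_content_map (diff : String) : Prop :=
  ∀ l ∈ PySem.Str.splitlines diff, l ≠ "+++ b/"
instance (diff : String) : Decidable (Pre_build_added_content_map diff) := by
  unfold Pre_build_added_content_map; infer_instance

def pvWitness_build_added_content_map : String := "+++ b/a.py\n+x\n ctx\n+++ b/b.py\n+y"

def Spec_build_added_content_map (diff : String) (out : List (String × String)) : Prop :=
  out = build_added_content_map_alt diff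
instance (diff : String) (out : List (String × String)) : Decidable (Spec_build_added_content_map diff out) := by
  unfold Spec_build_added_content_map; infer_instance

-- ===== CLAIM (what is proved, stated in full; the proofs are below) =====
def Claim_equal_build_added_content_map : Prop :=
  ∀ (diff : String), Dom_build_added_content_map diff → Pre_build_added_content_map diff →
    Spec_build_added_content_map diff (build_added_content_map diff)

-- ===== LEMMAS AND PROOFS =====
-- proof-only vocabulary: line classifiers, block extraction, segment list
def pvIsHeader (l : String) : Bool := PySem.Str.startswith l "+++ b/"
def pvIsAdded (l : String) : Bool :=
  PySem.Str.startswith l "+" && !PySem.Str.startswith l "+++"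
def pvPath (l : String) : String := PySem.Str.slice l (some 6) none
def pvStrip (l : String) : String := PySem.Str.slice l (some 1) none

-- added lines (stripped) before the first header
def pvAddedPre : List String → List String
  | [] => []
  | l :: ls =>
    if pvIsHeader l then []
    else if pvIsAdded l then pvStrip l :: pvAddedPre ls
    else pvAddedPre ls

-- the segments: each header paired with its block's added lines
def pvSegs : List String → List (String × List String)
  | [] => []
  | l :: ls => if pvIsHeader l then (pvPath l, pvAddedPre ls) :: pvSegs ls else pvSegs ls

def pvFoldSegs (d : PySem.Dict String (List String)) (segs : List (String × List String)) :
    PySem.Dict String (List String) :=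
  segs.foldl (fun d s => d.modify s.1 [] (· ++ s.2)) d

-- the dict already accumulated for the current path at a given loop state of A
def pvBase (d : PySem.Dict String (List String)) (cp : Option String) (lines : List String) :
    PySem.Dict String (List String) :=
  match cp with
  | none => d
  | some p => if p = "" then d else d.modify p [] (· ++ pvAddedPre lines)

-- Dict lemmas --------------------------------------------------------------
theorem pv_modify_modify {ν : Type} (d : PySem.Dict String ν) (k : String) (d0 : ν)
    (f g : ν → ν) :
    (d.modify k d0 f).modify k d0 g = d.modify k d0 (fun v => g (f v)) := by
  unfold PySem.Dict.modify
  rw [PySem.Dict.getD_insert_self, PySem.Dict.insert_insert_self]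

theorem pv_setdefault_modify {ν : Type} (d : PySem.Dict String ν) (k : String) (d0 : ν)
    (f : ν → ν) :
    (d.setdefault k d0).modify k d0 f = d.modify k d0 f := by
  rcases h : d.contains k with h' | h'
  · rw [PySem.Dict.setdefault_of_not_contains d d0 h]
    unfold PySem.Dict.modify
    rw [PySem.Dict.getD_insert_self, PySem.Dict.insert_insert_self,
        PySem.Dict.getD_of_not_contains d d0 h]
  · rw [PySem.Dict.setdefault_of_contains d d0 h]

theorem pv_list_replace_self {ν : Type} (l : List (String × ν)) (k : String) (d0 : ν)
    (hnd : (l.map Prod.fst).Nodup) (hc : (PySem.Dict.mk l).contains k = true) :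
    l.map (fun p => if (p.1 == k) = true then (k, (PySem.Dict.mk l).getD k d0) else p) = l := by
  induction l with
  | nil => rfl
  | cons hd tl ih =>
    obtain ⟨kh, vh⟩ := hd
    rw [List.map_cons, List.nodup_cons] at hnd
    rcases hnd with ⟨hnotin, hndtl⟩
    by_cases hk : kh = k
    · have hbeq : (kh == k) = true := by simp [hk]
      have hget : (PySem.Dict.mk ((kh, vh) :: tl)).getD k d0 = vh := by
        simp [PySem.Dict.getD, PySem.Dict.get?_mk_cons, hbeq]
      rw [hget, List.map_cons]
      simp only [hbeq]
      refine congrArg₂ List.cons (by simp [hk]) ?_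
      rw [List.map_congr_left (g := id), List.map_id]
      intro p hp
      have hne : p.1 ≠ k := by
        intro he
        apply hnotin
        rw [hk, ← he]
        exact List.mem_map.mpr ⟨p, hp, rfl⟩
      simp [hne]
    · have hbeq : (kh == k) = false := by simp [hk]
      have hget : (PySem.Dict.mk ((kh, vh) :: tl)).getD k d0 = (PySem.Dict.mk tl).getD k d0 := by
        simp [PySem.Dict.getD, PySem.Dict.get?_mk_cons, hbeq]
      have hc' : (PySem.Dict.mk tl).contains k = true := by
        unfold PySem.Dict.contains at hc ⊢
        simpa [hbeq] using hc
      rw [hget, List.map_cons]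
      simp only [hbeq]
      exact congrArg₂ List.cons (by simp) (ih hndtl hc')

theorem pv_modify_id_of_contains {ν : Type} (d : PySem.Dict String ν) (k : String) (d0 : ν)
    (hnd : d.keys.Nodup) (h : d.contains k = true) : d.modify k d0 (fun v => v) = d := by
  unfold PySem.Dict.modify
  apply PySem.Dict.ext
  rw [PySem.Dict.items_insert_of_contains d _ h]
  cases d with
  | mk l => exact pv_list_replace_self l k d0 (by simpa [PySem.Dict.keys] using hnd) h

theorem pv_nodup_keys_modify {ν : Type} (d : PySem.Dict String ν) (k : String) (d0 : ν)
    (f : ν → ν) (hnd : d.keys.Nodup) : (d.modify k d0 f).keys.Nodup := by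
  have := PySem.Dict.keys_modify d k d0 f
  have h2 := PySem.Dict.nodup_keys_insert d k (f (d.getD k d0)) hnd
  rw [List.nodup_iff_sublist] at h2 ⊢
  intro a hsub
  exact h2 a (by rw [← this]; exact hsub)

theorem pv_nodup_keys_setdefault {ν : Type} (d : PySem.Dict String ν) (k : String) (v : ν)
    (hnd : d.keys.Nodup) : (d.setdefault k v).keys.Nodup := by
  rcases h : d.contains k with h' | h'
  · rw [PySem.Dict.setdefault_of_not_contains d v h]
    exact PySem.Dict.nodup_keys_insert d k v hnd
  · rw [PySem.Dict.setdefault_of_contains d v h]; exact hnd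

-- a header line other than "+++ b/" has a nonempty path
theorem pv_path_ne_empty (l : String) (hh : PySem.Str.startswith l "+++ b/" = true)
    (hne : l ≠ "+++ b/") : PySem.Str.slice l (some 6) none ≠ "" := by
  intro hempty
  apply hne
  have hpre : ("+++ b/").toList <+: l.toList := by
    rw [PySem.Str.startswith_eq] at hh
    exact (PySem.Chars.startswith_iff _ _).mp hh
  obtain ⟨t, ht⟩ := hpre
  have hdrop : (PySem.Str.slice l (some 6) none).toList = l.toList.drop 6 := by
    rw [PySem.Str.toList_slice]
    simpa using PySem.List.slice_from (l.toList) (a := 6) (by norm_num)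
  have ht6 : l.toList.drop 6 = t := by
    rw [← ht]; simp
  have htn : t = [] := by
    rw [← ht6, ← hdrop, hempty]; rfl
  have hl : l.toList = ("+++ b/").toList := by rw [← ht, htn]; simp
  apply String.toList_inj.mp
  rw [hl]

theorem pv_modify_extend_nil (d : PySem.Dict String (List String)) (k : String)
    (hnd : d.keys.Nodup) (h : d.contains k = true) : d.modify k [] (· ++ pvAddedPre []) = d := by
  have he : (fun v : List String => v ++ pvAddedPre []) = fun v => v := by
    funext v; simp [pvAddedPre]
  rw [he]; exact pv_modify_id_of_contains d k [] hnd h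

theorem pvStepA_eq (st : PySem.Dict String (List String) × Option String) (l : String) :
    pvStepA st l =
      if pvIsHeader l then (st.1.setdefault (pvPath l) [], some (pvPath l))
      else if pvIsAdded l then
        (match st.2 with
         | some p => if p = "" then st else (st.1.modify p [] (· ++ [pvStrip l]), st.2)
         | none => st)
      else st := rfl

theorem pvStepB_eq (st : List String × List (String × List String)) (l : String) :
    pvStepB st l =
      if pvIsHeader l then ([], st.2 ++ [(pvPath l, st.1.reverse)])
      else if pvIsAdded l then (st.1 ++ [pvStrip l], st.2)
      else st := rfl

-- A-side characterisation: the loop's dict is the segment fold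
theorem pv_A_fold (lines : List String) (d : PySem.Dict String (List String))
    (cp : Option String)
    (hpre : ∀ l ∈ lines, l ≠ "+++ b/")
    (hnd : d.keys.Nodup)
    (hinv : ∀ p, cp = some p → p = "" ∨ d.contains p = true) :
    (lines.foldl pvStepA (d, cp)).1 = pvFoldSegs (pvBase d cp lines) (pvSegs lines) := by
  induction lines generalizing d cp with
  | nil =>
    simp only [List.foldl_nil, pvFoldSegs, pvSegs, pvBase]
    cases cp with
    | none => rfl
    | some p =>
      rcases hinv p rfl with he | hc
      · simp [he]
      · by_cases hp : p = ""
        · simp [hp]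
        · simp only [if_neg hp]
          exact (pv_modify_extend_nil d p hnd hc).symm
  | cons l ls ih =>
    rw [List.foldl_cons, pvStepA_eq]
    have hpre' : ∀ x ∈ ls, x ≠ "+++ b/" := fun x hx => hpre x (List.mem_cons_of_mem l hx)
    cases hh : pvIsHeader l with
    | true =>
      rw [if_pos rfl]
      have hq : pvPath l ≠ "" :=
        pv_path_ne_empty l hh (hpre l (List.mem_cons_self))
      rw [ih (d.setdefault (pvPath l) []) (some (pvPath l)) hpre'
          (pv_nodup_keys_setdefault d _ _ hnd)
          (by intro p hp; right; cases hp
              rw [PySem.Dict.contains_setdefault]; simp)]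
      have hseg : pvSegs (l :: ls) = (pvPath l, pvAddedPre ls) :: pvSegs ls := by
        simp [pvSegs, hh]
      have hap : pvAddedPre (l :: ls) = [] := by simp [pvAddedPre, hh]
      have hbase : pvBase d cp (l :: ls) = d := by
        unfold pvBase
        cases cp with
        | none => rfl
        | some p =>
          rcases hinv p rfl with he | hc
          · simp [he]
          · by_cases hp : p = ""
            · simp [hp]
            · simp only [if_neg hp]
              have hfe : (fun v : List String => v ++ pvAddedPre (l :: ls)) = fun v => v := by
                funext v; simp [hap]
              rw [hfe]
              exact pv_modify_id_of_contains d p [] hnd hc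
      rw [hseg, hbase,
          show pvBase (d.setdefault (pvPath l) []) (some (pvPath l)) ls
             = d.modify (pvPath l) [] (· ++ pvAddedPre ls) by
            simp only [pvBase, if_neg hq, pv_setdefault_modify]]
      simp [pvFoldSegs]
    | false =>
      cases ha : pvIsAdded l with
      | true =>
        simp only [Bool.false_eq_true, if_false, if_true]
        have hap : pvAddedPre (l :: ls) = pvStrip l :: pvAddedPre ls := by
          simp [pvAddedPre, hh, ha]
        have hseg : pvSegs (l :: ls) = pvSegs ls := by simp [pvSegs, hh]
        cases cp with
        | none =>
          dsimp only
          rw [ih d none hpre' hnd (by intro p hp; cases hp)]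
          simp [pvBase, hseg]
        | some p =>
          by_cases hp : p = ""
          · simp only [if_pos hp]
            rw [ih d (some p) hpre' hnd hinv]
            simp [pvBase, hp, hseg]
          · simp only [if_neg hp]
            rw [ih (d.modify p [] (· ++ [pvStrip l])) (some p) hpre'
                (pv_nodup_keys_modify d p [] _ hnd)
                (by intro q hq; right; cases hq
                    rw [PySem.Dict.contains_modify]; simp)]
            simp only [pvBase, if_neg hp, pv_modify_modify, hseg, hap]
            have hfe : (fun v : List String => (v ++ [pvStrip l]) ++ pvAddedPre ls)
                 = fun v => v ++ (pvStrip l :: pvAddedPre ls) := by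
              funext v; simp
            rw [hfe]
      | false =>
        simp only [Bool.false_eq_true, if_false]
        have hap : pvAddedPre (l :: ls) = pvAddedPre ls := by
          simp [pvAddedPre, hh, ha]
        have hseg : pvSegs (l :: ls) = pvSegs ls := by simp [pvSegs, hh]
        rw [ih d cp hpre' hnd hinv, hseg]
        unfold pvBase
        cases cp with
        | none => rfl
        | some p => rw [hap]

-- B-side characterisation: phase 1 produces the preamble's added lines and the segments, reversed
theorem pv_B_fold (lines : List String) :
    lines.reverse.foldl pvStepB ([], []) =
      ((pvAddedPre lines).reverse, (pvSegs lines).reverse) := by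
  induction lines with
  | nil => rfl
  | cons l ls ih =>
    rw [List.reverse_cons, List.foldl_append, List.foldl_cons, List.foldl_nil, ih, pvStepB_eq]
    simp only [pvAddedPre, pvSegs]
    cases hh : pvIsHeader l with
    | true => simp
    | false =>
      cases ha : pvIsAdded l with
      | true => simp
      | false => simp

-- ===== VERDICT (by name: the statement is the Claim_ definition above) =====
theorem build_added_content_map_spec : Claim_equal_build_added_content_map := by
  intro diff _ hpre
  unfold Spec_build_added_content_map build_added_content_map build_added_content_map_alt
  simp only []
  rw [pv_B_fold,
      pv_A_fold (PySem.Str.splitlines diff) PySem.Dict.empty none hpre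
        PySem.Dict.nodup_keys_empty (by intro p h; cases h)]
  simp [pvFoldSegs, pvBase]
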